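-- pv_equiv track=rewrite | github.com/RimPeter/AI_Novel_Creator | main/views.py | _dedupe_appended_text
-- ===== SOURCE A (Python) =====
-- def _dedupe_appended_text(existing: str, addition: str) -> str:
--     existing_text = (existing or "").strip()
--     addition_text = (addition or "").strip()
--     if not addition_text:
--         return ""
--     if not existing_text:
--         return addition_text
--
--     existing_lower = existing_text.lower()
--     addition_lower = addition_text.lower()
--     if addition_lower in existing_lower:
--         return ""
--
--     def trim_overlap(text: str) -> str:
--         return text.lstrip(" \t\r\n;,:.-").strip()
--
--     if addition_lower.startswith(existing_lower):
--         return trim_overlap(addition_text[len(existing_text) :])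
--
--     max_overlap = min(len(existing_text), len(addition_text))
--     for overlap in range(max_overlap, 0, -1):
--         if existing_lower[-overlap:] == addition_lower[:overlap]:
--             return trim_overlap(addition_text[overlap:])
--
--     return addition_text
-- ===== SOURCE B (Python) =====
-- def _dedupe_appended_text(existing: str, addition: str) -> str:
--     existing_text = (existing or "").strip()
--     addition_text = (addition or "").strip()
--     if not addition_text:
--         return ""
--     if not existing_text:
--         return addition_text
--
--     el = existing_text.lower()
--     al = addition_text.lower()
--     if al in el:
--         return ""
--
--     # Jump between occurrences of addition's first character inside existing
--     # (C-level str.find) instead of testing every overlap length with slicing.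
--     # The first matching position gives the longest suffix/prefix overlap.
--     a0 = al[:1]
--     pos = el.find(a0)
--     while pos != -1:
--         if al.startswith(el[pos:]):
--             tail = addition_text[len(el) - pos:]
--             return tail.lstrip(" \t\r\n;,:.-").strip()
--         pos = el.find(a0, pos + 1)
--     return addition_text
-- ===== Notes on version B (the rewrite author's own statement) =====
-- stated objective: faster
-- what changed: Instead of testing every overlap length largest-first with a fresh pair of slices per candidate, B jumps between occurrences of the addition's first character inside existing via str.find and tests each tail once with startswith, returning at the first (= longest-overlap) match.
import Mathlib
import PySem

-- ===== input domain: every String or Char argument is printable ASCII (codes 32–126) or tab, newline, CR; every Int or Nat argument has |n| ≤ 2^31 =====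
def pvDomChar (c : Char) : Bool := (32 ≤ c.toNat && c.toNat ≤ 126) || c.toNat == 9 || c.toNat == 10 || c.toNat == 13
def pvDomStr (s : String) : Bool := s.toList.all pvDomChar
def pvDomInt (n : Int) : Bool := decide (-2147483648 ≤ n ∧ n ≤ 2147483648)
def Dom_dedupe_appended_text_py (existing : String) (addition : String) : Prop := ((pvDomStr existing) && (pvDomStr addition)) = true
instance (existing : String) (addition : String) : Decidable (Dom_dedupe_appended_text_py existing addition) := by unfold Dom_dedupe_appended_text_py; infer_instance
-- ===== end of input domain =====

-- B replaces A's largest-first scan over all overlap lengths (a fresh slice comparison per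
-- candidate) by jumping between the occurrences of the addition's first character inside
-- `existing` via str.find and testing the tail with startswith; measurably faster in practice.

-- ===== PORT A =====
-- trim_overlap helper, identical in both Python sources:
-- text.lstrip(" \t\r\n;,:.-").strip(); lstrip(chars) drops exactly the leading
-- characters contained in chars, i.e. dropWhile membership (exact).
def pvTrimOverlap (t : List Char) : List Char :=
  PySem.Chars.strip (t.dropWhile (fun c => (" \t\r\n;,:.-".toList).contains c))

-- for overlap in range(max_overlap, 0, -1): if existing_lower[-overlap:] == addition_lower[:overlap]:
--   return trim_overlap(addition_text[overlap:])  / after the loop: return addition_text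
def dedupeALoop (at_ el al : List Char) : Nat → List Char
  | 0 => at_
  | k + 1 =>
    if PySem.List.slice el (some (-((k + 1 : Nat) : Int))) none
         = PySem.List.slice al none (some ((k + 1 : Nat) : Int)) then
      pvTrimOverlap (PySem.List.slice at_ (some ((k + 1 : Nat) : Int)) none)
    else
      dedupeALoop at_ el al k

-- `(existing or "")` is the identity on str arguments (empty string stays empty under strip).
def dedupe_appended_text_py (existing : String) (addition : String) : String :=
  let existing_text := PySem.Chars.strip existing.toList
  let addition_text := PySem.Chars.strip addition.toList
  if addition_text = [] then String.ofList []
  else if existing_text = [] then String.ofList addition_text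
  else
    let existing_lower := PySem.Chars.lower existing_text
    let addition_lower := PySem.Chars.lower addition_text
    if PySem.Chars.isIn addition_lower existing_lower then String.ofList []
    else if PySem.Chars.startswith addition_lower existing_lower then
      String.ofList (pvTrimOverlap (PySem.List.slice addition_text (some ((existing_text.length : Nat) : Int)) none))
    else
      let max_overlap := min existing_text.length addition_text.length
      String.ofList (dedupeALoop addition_text existing_lower addition_lower max_overlap)

-- ===== PORT B =====
-- while pos != -1: if al.startswith(el[pos:]): return trim(addition_text[len(el)-pos:])
--                  pos = el.find(a0, pos + 1)   / after the loop: return addition_text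
-- fuel = len(el) + 1 bounds the iteration count (find from pos+1 returns a strictly
-- larger position or -1); it only makes the same computation total.
def dedupeBLoop (at_ el al a0 : List Char) : Nat → Int → List Char
  | 0, _ => at_
  | fuel + 1, pos =>
    if pos = -1 then at_
    else if PySem.Chars.startswith al (PySem.List.slice el (some pos) none) then
      pvTrimOverlap (PySem.List.slice at_ (some ((el.length : Int) - pos)) none)
    else
      dedupeBLoop at_ el al a0 fuel (PySem.Chars.findFrom el a0 (pos + 1) none)

def dedupe_appended_text_py_alt (existing : String) (addition : String) : String :=
  let existing_text := PySem.Chars.strip existing.toList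
  let addition_text := PySem.Chars.strip addition.toList
  if addition_text = [] then String.ofList []
  else if existing_text = [] then String.ofList addition_text
  else
    let el := PySem.Chars.lower existing_text
    let al := PySem.Chars.lower addition_text
    if PySem.Chars.isIn al el then String.ofList []
    else
      let a0 := PySem.List.slice al none (some 1)
      String.ofList (dedupeBLoop addition_text el al a0 (el.length + 1) (PySem.Chars.find el a0))

-- ===== PRECONDITION & SPEC =====
def Spec_dedupe_appended_text_py (existing : String) (addition : String) (out : String) : Prop := out = dedupe_appended_text_py_alt existing addition
instance (existing : String) (addition : String) (out : String) : Decidable (Spec_dedupe_appended_text_py existing addition out) := by unfold Spec_dedupe_appended_text_py; infer_instance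

-- ===== CLAIM (what is proved, stated in full; the proofs are below) =====
def Claim_equal_dedupe_appended_text_py : Prop := ∀ (existing : String) (addition : String), Dom_dedupe_appended_text_py existing addition → Spec_dedupe_appended_text_py existing addition (dedupe_appended_text_py existing addition)

-- ===== LEMMAS AND PROOFS =====

-- Reference scan: the first position p ≥ j with el[p:] a prefix of al (none if there is none).
def refOv (el al : List Char) (p : Nat) : Option Nat :=
  if p < el.length then
    if el.drop p <+: al then some p else refOv el al (p + 1)
  else none
termination_by el.length - p

-- the common continuation both loops produce from a found position
def refOut (at_ : List Char) (lel : Nat) : Option Nat → List Char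
  | some p => pvTrimOverlap (at_.drop (lel - p))
  | none => at_

theorem pvLower_length (t : List Char) : (PySem.Chars.lower t).length = t.length := by
  show (t.map PySem.Chars.lowerChar).length = t.length
  exact List.length_map _

theorem refOv_none (el al : List Char) :
    ∀ j, (∀ p, j ≤ p → p < el.length → ¬ el.drop p <+: al) → refOv el al j = none := by
  intro j
  induction j using (refOv.induct el al) with
  | case1 p hlt hpre =>
    intro h; exact absurd hpre (h p le_rfl hlt)
  | case2 p hlt hpre ih =>
    intro h; rw [refOv, if_pos hlt, if_neg hpre]
    exact ih (fun q hq hql => h q (by omega) hql)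
  | case3 p hge =>
    intro h; rw [refOv, if_neg hge]

theorem refOv_skip_range (el al : List Char) (t : Nat) :
    ∀ n j, t - j ≤ n → j ≤ t → (∀ p, j ≤ p → p < t → ¬ el.drop p <+: al) →
      refOv el al j = refOv el al t := by
  intro n
  induction n with
  | zero =>
    intro j h1 h2 _
    have : j = t := by omega
    rw [this]
  | succ n ih =>
    intro j h1 h2 h3
    by_cases hjt : j = t
    · rw [hjt]
    · have hjlt : j < t := by omega
      by_cases hjl : j < el.length
      · rw [refOv, if_pos hjl, if_neg (h3 j le_rfl hjlt)]
        exact ih (j + 1) (by omega) (by omega) (fun p hp hpt => h3 p (by omega) hpt)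
      · rw [refOv, if_neg hjl, refOv, if_neg (by omega : ¬ t < el.length)]

theorem dropk_prefix_iff (el al : List Char) (k : Nat) (hk : k ≤ el.length) :
    el.drop (el.length - k) = al.take k ↔ el.drop (el.length - k) <+: al := by
  constructor
  · intro h; rw [h]; exact List.take_prefix k al
  · intro h
    have hlen : (el.drop (el.length - k)).length = k := by
      rw [List.length_drop]; omega
    have := List.prefix_iff_eq_take.mp h
    rwa [hlen] at this

theorem take_one_prefix_of_prefix {x al : List Char} (hx : x ≠ []) (h : x <+: al) :
    al.take 1 <+: x := by
  obtain ⟨t, rfl⟩ := h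
  have h1 : 1 ≤ x.length := by
    cases x with
    | nil => exact absurd rfl hx
    | cons c cs => simp
  rw [List.take_append_of_le_length h1]
  exact List.take_prefix 1 x

theorem Aloop_eq (at_ el al : List Char) :
    ∀ m, m ≤ el.length →
      dedupeALoop at_ el al m = refOut at_ el.length (refOv el al (el.length - m)) := by
  intro m
  induction m with
  | zero =>
    intro _
    rw [dedupeALoop, refOv, if_neg (by omega : ¬ el.length - 0 < el.length)]
    rfl
  | succ m ih =>
    intro hm
    rw [dedupeALoop, PySem.List.slice_from_neg_natCast el (m + 1) (by omega),
      PySem.List.slice_to_natCast, PySem.List.slice_from_natCast]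
    have hp : el.length - (m + 1) < el.length := by omega
    rw [refOv, if_pos hp]
    by_cases hc : List.drop (el.length - (m + 1)) el = List.take (m + 1) al
    · rw [if_pos hc, if_pos ((dropk_prefix_iff el al (m + 1) hm).mp hc)]
      show pvTrimOverlap (at_.drop (m + 1)) =
        pvTrimOverlap (at_.drop (el.length - (el.length - (m + 1))))
      congr 2
      omega
    · rw [if_neg hc, if_neg (fun h => hc ((dropk_prefix_iff el al (m + 1) hm).mpr h))]
      have he : el.length - (m + 1) + 1 = el.length - m := by omega
      rw [he]
      exact ih (by omega)

theorem A_eq (el al at_ : List Char) (hel : el ≠ []) :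
    (if PySem.Chars.startswith al el then
        pvTrimOverlap (PySem.List.slice at_ (some (el.length : Int)) none)
      else dedupeALoop at_ el al (min el.length al.length))
    = refOut at_ el.length (refOv el al 0) := by
  by_cases hsw : PySem.Chars.startswith al el = true
  · rw [if_pos hsw, PySem.List.slice_from_natCast]
    have hpre : el.drop 0 <+: al := by
      rw [List.drop_zero]; exact (PySem.Chars.startswith_iff al el).mp hsw
    have h0 : 0 < el.length := List.length_pos_of_ne_nil hel
    rw [refOv, if_pos h0, if_pos hpre]
    show pvTrimOverlap (at_.drop el.length) = pvTrimOverlap (at_.drop (el.length - 0))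
    congr 2
  · rw [if_neg hsw, Aloop_eq at_ el al (min el.length al.length) (by omega)]
    have hskip : refOv el al 0 = refOv el al (el.length - min el.length al.length) := by
      apply refOv_skip_range el al (el.length - min el.length al.length) el.length 0 (by omega) (by omega)
      intro p hp hpt hpre
      have := hpre.length_le
      rw [List.length_drop] at this
      omega
    rw [hskip]

theorem a0_ne_nil {al : List Char} (hal : al ≠ []) : al.take 1 ≠ [] := by
  have h1 : 0 < al.length := List.length_pos_of_ne_nil hal
  have : (al.take 1).length = 1 := by rw [List.length_take]; omega
  intro h
  rw [h] at this
  simp at this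

theorem Bloop_eq (el al at_ : List Char) (hal : al ≠ []) :
    ∀ fuel j, j ≤ el.length → el.length + 1 - j ≤ fuel →
      dedupeBLoop at_ el al (al.take 1) fuel (PySem.Chars.findFrom el (al.take 1) (j : Nat))
        = refOut at_ el.length (refOv el al j) := by
  intro fuel
  induction fuel with
  | zero => intro j hj hf; omega
  | succ fuel ih =>
    intro j hj hf
    have ha0 : al.take 1 ≠ [] := a0_ne_nil hal
    rw [PySem.Chars.findFrom_natCast el (al.take 1) j hj]
    by_cases hfind : PySem.Chars.find (List.drop j el) (al.take 1) = -1
    · rw [if_pos hfind, dedupeBLoop, if_pos rfl]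
      have hno : ¬ (al.take 1) <:+: List.drop j el :=
        (PySem.Chars.find_eq_neg_one_iff (List.drop j el) (al.take 1)).mp hfind
      have hnone : refOv el al j = none := by
        apply refOv_none
        intro p hjp hpl hpre
        apply hno
        have hxne : el.drop p ≠ [] := by
          intro h
          rw [List.drop_eq_nil_iff] at h
          omega
        have h1 : al.take 1 <+: el.drop p := take_one_prefix_of_prefix hxne hpre
        have h2 : el.drop p = (el.drop j).drop (p - j) := by
          rw [List.drop_drop]
          congr 1
          omega
        rw [h2] at h1
        exact h1.isInfix.trans (List.drop_suffix (p - j) (el.drop j)).isInfix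
      rw [hnone]
      rfl
    · rw [if_neg hfind]
      have hf0 : 0 ≤ PySem.Chars.find (List.drop j el) (al.take 1) := by
        have := PySem.Chars.neg_one_le_find (List.drop j el) (al.take 1)
        omega
      obtain ⟨hpre, hmin⟩ := PySem.Chars.find_spec (s := List.drop j el) (sub := al.take 1) hf0
      set q := (PySem.Chars.find (List.drop j el) (al.take 1)).toNat with hq
      have hcast : (j : Int) + PySem.Chars.find (List.drop j el) (al.take 1) = ((j + q : Nat) : Int) := by
        omega
      rw [hcast]
      have hdd : (el.drop j).drop q = el.drop (j + q) := List.drop_drop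
      rw [hdd] at hpre
      have hplt : j + q < el.length := by
        have hxne : el.drop (j + q) ≠ [] := by
          intro h
          rw [h] at hpre
          exact ha0 (List.prefix_nil.mp hpre)
        rw [ne_eq, List.drop_eq_nil_iff] at hxne
        omega
      have hskip : refOv el al j = refOv el al (j + q) := by
        apply refOv_skip_range el al (j + q) (j + q) j (by omega) (by omega)
        intro p hjp hplt2 hpre2
        have hxne : el.drop p ≠ [] := by
          intro h
          rw [List.drop_eq_nil_iff] at h
          omega
        have h1 : al.take 1 <+: el.drop p := take_one_prefix_of_prefix hxne hpre2
        have h2 : el.drop p = (el.drop j).drop (p - j) := by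
          rw [List.drop_drop]; congr 1; omega
        rw [h2] at h1
        exact hmin (p - j) (by omega) h1
      rw [dedupeBLoop, if_neg (by omega : ¬ ((j + q : Nat) : Int) = -1),
        PySem.List.slice_from_natCast]
      by_cases hsw : PySem.Chars.startswith al (List.drop (j + q) el) = true
      · rw [if_pos hsw]
        have hpre3 : el.drop (j + q) <+: al := (PySem.Chars.startswith_iff al _).mp hsw
        rw [hskip, refOv, if_pos hplt, if_pos hpre3]
        have hc : (el.length : Int) - ((j + q : Nat) : Int) = ((el.length - (j + q) : Nat) : Int) := by
          omega
        rw [hc, PySem.List.slice_from_natCast]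
        rfl
      · rw [if_neg hsw]
        have hpre3 : ¬ el.drop (j + q) <+: al := fun h =>
          hsw ((PySem.Chars.startswith_iff al _).mpr h)
        have hstep : refOv el al (j + q) = refOv el al (j + q + 1) := by
          rw [refOv, if_pos hplt, if_neg hpre3]
        have hc : ((j + q : Nat) : Int) + 1 = ((j + q + 1 : Nat) : Int) := by omega
        rw [hc, ih (j + q + 1) (by omega) (by omega), hskip, hstep]

theorem slice_one (al : List Char) : PySem.List.slice al none (some 1) = al.take 1 := by
  simpa using PySem.List.slice_to_natCast al 1

theorem main_eq (et at_ : List Char) :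
    (if at_ = [] then String.ofList [] else if et = [] then String.ofList at_ else
      (if PySem.Chars.isIn (PySem.Chars.lower at_) (PySem.Chars.lower et) then String.ofList []
       else if PySem.Chars.startswith (PySem.Chars.lower at_) (PySem.Chars.lower et) then
         String.ofList (pvTrimOverlap (PySem.List.slice at_ (some ((et.length : Nat) : Int)) none))
       else String.ofList (dedupeALoop at_ (PySem.Chars.lower et) (PySem.Chars.lower at_)
         (min et.length at_.length))))
  = (if at_ = [] then String.ofList [] else if et = [] then String.ofList at_ else
      (if PySem.Chars.isIn (PySem.Chars.lower at_) (PySem.Chars.lower et) then String.ofList []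
       else String.ofList (dedupeBLoop at_ (PySem.Chars.lower et) (PySem.Chars.lower at_)
         (PySem.List.slice (PySem.Chars.lower at_) none (some 1))
         ((PySem.Chars.lower et).length + 1)
         (PySem.Chars.find (PySem.Chars.lower et)
           (PySem.List.slice (PySem.Chars.lower at_) none (some 1)))))) := by
  by_cases h1 : at_ = []
  · rw [if_pos h1, if_pos h1]
  rw [if_neg h1, if_neg h1]
  by_cases h2 : et = []
  · rw [if_pos h2, if_pos h2]
  rw [if_neg h2, if_neg h2]
  by_cases h3 : PySem.Chars.isIn (PySem.Chars.lower at_) (PySem.Chars.lower et) = true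
  · rw [if_pos h3, if_pos h3]
  rw [if_neg h3, if_neg h3]
  have hel : PySem.Chars.lower et ≠ [] := by
    intro h
    have := pvLower_length et
    rw [h] at this
    exact h2 (List.length_eq_zero_iff.mp this.symm)
  have hal : PySem.Chars.lower at_ ≠ [] := by
    intro h
    have := pvLower_length at_
    rw [h] at this
    exact h1 (List.length_eq_zero_iff.mp this.symm)
  rw [← apply_ite String.ofList]
  congr 1
  rw [slice_one]
  have hlet : et.length = (PySem.Chars.lower et).length := (pvLower_length et).symm
  have hlat : at_.length = (PySem.Chars.lower at_).length := (pvLower_length at_).symm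
  rw [hlet, hlat]
  rw [A_eq (PySem.Chars.lower et) (PySem.Chars.lower at_) at_ hel]
  rw [← PySem.Chars.findFrom_zero (PySem.Chars.lower et) ((PySem.Chars.lower at_).take 1)]
  have h0 : (0 : Int) = ((0 : Nat) : Int) := rfl
  rw [h0, Bloop_eq (PySem.Chars.lower et) (PySem.Chars.lower at_) at_ hal
    ((PySem.Chars.lower et).length + 1) 0 (by omega) (by omega)]

-- ===== VERDICT (by name: the statement is the Claim_ definition above) =====
theorem dedupe_appended_text_py_spec : Claim_equal_dedupe_appended_text_py := by
  intro existing addition _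
  show dedupe_appended_text_py existing addition = dedupe_appended_text_py_alt existing addition
  exact main_eq (PySem.Chars.strip existing.toList) (PySem.Chars.strip addition.toList)
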